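-- pv_equiv track=rewrite | github.com/Chiazokam/Python_Works | abstract_data_types.py | remove_unwanted_char
-- ===== SOURCE A (Python) =====
-- def remove_unwanted_char(file_char):
--     new_symbol_open_string = []
--     new_symbol_close_string = []
--     for char in file_char:
--         if char == "<":
--             new_symbol_open_string.append(char)
--         elif char == ">":
--             new_symbol_close_string.append(char)
--     for char in new_symbol_close_string:
--         new_symbol_open_string.append(char)
--     return new_symbol_open_string
-- ===== SOURCE B (Python) =====
-- def remove_unwanted_char(file_char):
--     return ["<"] * file_char.count("<") + [">"] * file_char.count(">")
-- ===== Notes on version B (the rewrite author's own statement) =====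
-- stated objective: simpler
-- what changed: Replaces the per-character accumulator lists and the explicit re-append loop with count-then-construct: count each bracket kind with str.count and build the result by list repetition.
import Mathlib
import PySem

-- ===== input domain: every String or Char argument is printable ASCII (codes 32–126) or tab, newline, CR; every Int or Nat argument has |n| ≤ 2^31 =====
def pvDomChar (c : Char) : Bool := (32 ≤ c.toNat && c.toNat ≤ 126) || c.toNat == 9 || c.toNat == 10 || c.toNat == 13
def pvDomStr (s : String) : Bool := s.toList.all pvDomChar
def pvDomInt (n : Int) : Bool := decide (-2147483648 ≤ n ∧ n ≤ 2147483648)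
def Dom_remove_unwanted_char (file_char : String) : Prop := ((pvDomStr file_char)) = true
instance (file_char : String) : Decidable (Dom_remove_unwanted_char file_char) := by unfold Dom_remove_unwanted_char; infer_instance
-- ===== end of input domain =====

-- B collects the same characters by counting: ['<']*count('<') + ['>']*count('>') — simpler, no accumulator lists.

-- ===== PORT A =====
-- literal port: two accumulator lists filled in one scan, then the close-chars appended one by one
def remove_unwanted_char (file_char : String) : List String :=
  let p := file_char.toList.foldl
    (fun (acc : List String × List String) c =>
      if c == '<' then (acc.1 ++ [String.ofList [c]], acc.2)
      else if c == '>' then (acc.1, acc.2 ++ [String.ofList [c]])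
      else acc)
    ([], [])
  p.2.foldl (fun acc s => acc ++ [s]) p.1

-- ===== PORT B =====
def remove_unwanted_char_alt (file_char : String) : List String :=
  List.replicate (PySem.Str.count file_char "<") "<"
    ++ List.replicate (PySem.Str.count file_char ">") ">"

-- ===== PRECONDITION & SPEC =====
def Spec_remove_unwanted_char (file_char : String) (out : List String) : Prop := out = remove_unwanted_char_alt file_char
instance (file_char : String) (out : List String) : Decidable (Spec_remove_unwanted_char file_char out) := by unfold Spec_remove_unwanted_char; infer_instance

-- ===== CLAIM (what is proved, stated in full; the proofs are below) =====
def Claim_equal_remove_unwanted_char : Prop := ∀ (file_char : String), Dom_remove_unwanted_char file_char → Spec_remove_unwanted_char file_char (remove_unwanted_char file_char)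

-- ===== LEMMAS AND PROOFS =====

-- str.count with a single-character needle is List.count of that character
theorem count_go_single (v : Char) : ∀ (l : List Char) (fuel acc : Nat), l.length ≤ fuel →
    PySem.Chars.count.go [v] fuel l acc = acc + l.count v := by
  intro l
  induction l with
  | nil => intro fuel acc _; cases fuel <;> simp [PySem.Chars.count.go]
  | cons c t ih =>
    intro fuel acc h
    cases fuel with
    | zero => simp at h
    | succ f =>
      rw [PySem.Chars.count.go]
      by_cases hc : c = v
      · subst hc
        simp [List.isPrefixOf, ih f (acc + 1) (by simpa using h)]
        omega
      · simp [List.isPrefixOf, Ne.symm hc, hc, ih f acc (by simpa using h)]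

theorem count_single (v : Char) (s : String) :
    PySem.Str.count s (String.ofList [v]) = s.toList.count v := by
  have h : PySem.Str.count s (String.ofList [v])
      = PySem.Chars.count.go [v] s.toList.length s.toList 0 := by
    simp [PySem.Str.count, PySem.Chars.count]
  rw [h, count_go_single v s.toList s.toList.length 0 le_rfl]
  simp

-- a replicated element added at either end gives the same list
theorem cons_replicate_eq_append (n : Nat) (v : String) :
    v :: List.replicate n v = List.replicate n v ++ [v] := by
  rw [← List.replicate_succ, List.replicate_succ']

-- appending the elements of l one by one onto init is init ++ l
theorem foldl_append_one (init : List String) (l : List String) :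
    l.foldl (fun acc s => acc ++ [s]) init = init ++ l := by
  induction l generalizing init with
  | nil => simp
  | cons x t ih => simp [List.foldl, ih]

-- invariant of A's scanning loop: each accumulator ends with the replicated matching char
theorem scan_invariant (cs : List Char) : ∀ (o c : List String),
    cs.foldl
      (fun (acc : List String × List String) ch =>
        if ch == '<' then (acc.1 ++ [String.ofList [ch]], acc.2)
        else if ch == '>' then (acc.1, acc.2 ++ [String.ofList [ch]])
        else acc)
      (o, c)
    = (o ++ List.replicate (cs.count '<') "<", c ++ List.replicate (cs.count '>') ">") := by
  induction cs with
  | nil => intro o c; simp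
  | cons ch t ih =>
    intro o c
    simp only [List.foldl_cons]
    by_cases h1 : ch = '<'
    · subst h1
      rw [if_pos (by decide), ih]
      simp [List.replicate_succ', cons_replicate_eq_append]
    · by_cases h2 : ch = '>'
      · subst h2
        rw [if_neg (by decide), if_pos (by decide), ih]
        simp [List.replicate_succ', cons_replicate_eq_append]
      · rw [if_neg (by simp [h1]), if_neg (by simp [h2]), ih]
        simp [h1, h2]

-- ===== VERDICT (by name: the statement is the Claim_ definition above) =====
theorem remove_unwanted_char_spec : Claim_equal_remove_unwanted_char := by
  intro s _
  unfold Spec_remove_unwanted_char remove_unwanted_char remove_unwanted_char_alt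
  rw [scan_invariant s.toList [] []]
  rw [foldl_append_one]
  rw [count_single '<' s, count_single '>' s]
  simp
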